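-- pv_equiv track=rewrite | github.com/agalambas/1617-LEIC-FP | functions.py | gera_chave2
-- ===== SOURCE A (Python) =====
-- def gera_chave2(letras):
--
-- 	def chave(letras, colunas):
-- 		if len(letras) <= colunas:
-- 			return (letras,)
-- 		else:
-- 			return (letras[:colunas],) + chave(letras[colunas:], colunas)
--
-- 	# O numero de tuplos e a raiz quadrada do menor quadrado perfeito nao inferior ao numero de caracteres.
-- 	# linhas --> numero de tuplos da chave
-- 	linhas = 1
-- 	while linhas*linhas < len(letras):
-- 		linhas = linhas + 1
--
-- 	# Considerando o numero de tuplos e igual ao numero de elemetos de cada tuplo.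
-- 	# Se o numero de elementos de todos os tuplos (menos o ultimo) for maior ou igual ao numero total de elementos:
-- 	# Decresce-se o numero de elementos por tuplo
-- 	if linhas*(linhas-1) >= len(letras):
-- 		# colunas --> numero de elementos de cada tuplo (menos do ultimo que pode ser mais curto).
-- 		colunas = linhas - 1
-- 	else:
-- 		colunas = linhas
-- 	return chave(letras, colunas)
-- ===== SOURCE B (Python) =====
-- def gera_chave2(letras):
-- 	# Different decomposition: compute the chunk width directly as the least c
-- 	# with c*(c+1) >= len(letras), then chunk iteratively instead of recursively.
-- 	n = len(letras)
-- 	colunas = 0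
-- 	while colunas * (colunas + 1) < n:
-- 		colunas = colunas + 1
-- 	pedacos = []
-- 	while len(letras) > colunas:
-- 		pedacos.append(letras[:colunas])
-- 		letras = letras[colunas:]
-- 	pedacos.append(letras)
-- 	return tuple(pedacos)
-- ===== Notes on version B (the rewrite author's own statement) =====
-- stated objective: faster
-- what changed: B computes the chunk width directly as the least c with c*(c+1) >= len(letras) (one loop instead of the ceil-sqrt loop plus correction branch) and chunks the string with an iterative list-append loop instead of the recursive helper that rebuilds the result tuple with (x,)+rest at every level.
import Mathlib
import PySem

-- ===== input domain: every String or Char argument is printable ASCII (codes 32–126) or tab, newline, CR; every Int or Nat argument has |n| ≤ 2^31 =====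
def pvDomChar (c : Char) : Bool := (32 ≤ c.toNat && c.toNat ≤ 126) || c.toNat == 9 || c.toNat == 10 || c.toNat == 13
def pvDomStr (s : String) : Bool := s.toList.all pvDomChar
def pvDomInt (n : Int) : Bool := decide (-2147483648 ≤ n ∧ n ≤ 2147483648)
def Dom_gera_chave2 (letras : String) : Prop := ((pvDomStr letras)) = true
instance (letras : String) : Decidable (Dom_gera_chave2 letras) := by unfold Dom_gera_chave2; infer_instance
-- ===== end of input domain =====

-- B replaces A's ceil-sqrt loop + correction branch by one loop finding the least c with
-- c*(c+1) ≥ len(letras), and A's recursive chunking helper by an iterative accumulator loop.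

-- ===== PORT A =====
-- `while linhas*linhas < len(letras): linhas += 1`; fuel (= n) only makes the loop total,
-- it is always sufficient since the loop runs at most n-1 times.
def pvLinhasLoop (n : Nat) : Nat → Nat → Nat
  | 0, l => l
  | f+1, l => if l * l < n then pvLinhasLoop n f (l + 1) else l

-- the recursive helper `chave`; fuel (= n) only makes it total (colunas = 0 forces n = 0).
def pvChave (colunas : Nat) : Nat → List Char → List String
  | 0, letras => [String.mk letras]
  | f+1, letras =>
    if letras.length ≤ colunas then [String.mk letras]
    else String.mk (letras.take colunas) :: pvChave colunas f (letras.drop colunas)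

def gera_chave2 (letras : String) : List String :=
  let cs := letras.toList
  let n := cs.length
  let linhas := pvLinhasLoop n n 1
  let colunas := if linhas * (linhas - 1) ≥ n then linhas - 1 else linhas
  pvChave colunas n cs

-- ===== PORT B =====
-- `while colunas*(colunas+1) < n: colunas += 1`; fuel (= n) only makes the loop total.
def pvColunasLoop (n : Nat) : Nat → Nat → Nat
  | 0, c => c
  | f+1, c => if c * (c + 1) < n then pvColunasLoop n f (c + 1) else c

-- `while len(letras) > colunas: pedacos.append(...); letras = letras[colunas:]` then final append;
-- fuel (= n) only makes the loop total.
def pvChunksLoop (colunas : Nat) : Nat → List Char → List String → List String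
  | 0, letras, acc => acc ++ [String.mk letras]
  | f+1, letras, acc =>
    if letras.length > colunas then
      pvChunksLoop colunas f (letras.drop colunas) (acc ++ [String.mk (letras.take colunas)])
    else acc ++ [String.mk letras]

def gera_chave2_alt (letras : String) : List String :=
  let cs := letras.toList
  let n := cs.length
  let colunas := pvColunasLoop n n 0
  pvChunksLoop colunas n cs []

-- ===== PRECONDITION & SPEC =====
def Spec_gera_chave2 (letras : String) (out : List String) : Prop := out = gera_chave2_alt letras
instance (letras : String) (out : List String) : Decidable (Spec_gera_chave2 letras out) := by unfold Spec_gera_chave2; infer_instance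

-- ===== CLAIM (what is proved, stated in full; the proofs are below) =====
def Claim_equal_gera_chave2 : Prop := ∀ (letras : String), Dom_gera_chave2 letras → Spec_gera_chave2 letras (gera_chave2 letras)

-- ===== LEMMAS AND PROOFS =====

-- B's accumulator loop is A's recursion with the results collected in front.
theorem chunks_eq_chave (c : Nat) : ∀ (f : Nat) (cs : List Char) (acc : List String),
    pvChunksLoop c f cs acc = acc ++ pvChave c f cs := by
  intro f
  induction f with
  | zero => intro cs acc; simp [pvChunksLoop, pvChave]
  | succ f ih =>
    intro cs acc
    by_cases h : cs.length ≤ c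
    · simp [pvChunksLoop, pvChave, h, Nat.not_lt.mpr h]
    · simp [pvChunksLoop, pvChave, h, Nat.lt_of_not_le h, ih]

-- A's loop result: least l ≥ start with n ≤ l*l, provided the fuel covers the distance.
theorem linhas_spec (n : Nat) : ∀ (f l : Nat), n ≤ l + f →
    n ≤ pvLinhasLoop n f l * pvLinhasLoop n f l ∧
    (∀ m, l ≤ m → m < pvLinhasLoop n f l → m * m < n) := by
  intro f
  induction f with
  | zero =>
    intro l h
    refine ⟨?_, ?_⟩
    · simp only [pvLinhasLoop]; nlinarith
    · intro m hm hm'; simp only [pvLinhasLoop] at hm'; omega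
  | succ f ih =>
    intro l h
    by_cases hlt : l * l < n
    · have := ih (l + 1) (by omega)
      simp only [pvLinhasLoop, if_pos hlt]
      refine ⟨this.1, ?_⟩
      intro m hm hm'
      rcases Nat.eq_or_lt_of_le hm with rfl | hgt
      · exact hlt
      · exact this.2 m hgt hm'
    · simp only [pvLinhasLoop, if_neg hlt]
      exact ⟨Nat.le_of_not_lt hlt, by intro m hm hm'; omega⟩

-- B's loop result: least c ≥ start with n ≤ c*(c+1), provided the fuel covers the distance.
theorem colunas_spec (n : Nat) : ∀ (f c : Nat), n ≤ c + f →
    n ≤ pvColunasLoop n f c * (pvColunasLoop n f c + 1) ∧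
    (∀ m, c ≤ m → m < pvColunasLoop n f c → m * (m + 1) < n) := by
  intro f
  induction f with
  | zero =>
    intro c h
    refine ⟨?_, ?_⟩
    · simp only [pvColunasLoop]; nlinarith
    · intro m hm hm'; simp only [pvColunasLoop] at hm'; omega
  | succ f ih =>
    intro c h
    by_cases hlt : c * (c + 1) < n
    · have := ih (c + 1) (by omega)
      simp only [pvColunasLoop, if_pos hlt]
      refine ⟨this.1, ?_⟩
      intro m hm hm'
      rcases Nat.eq_or_lt_of_le hm with rfl | hgt
      · exact hlt
      · exact this.2 m hgt hm'
    · simp only [pvColunasLoop, if_neg hlt]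
      exact ⟨Nat.le_of_not_lt hlt, by intro m hm hm'; omega⟩

-- pure arithmetic: if L is the least l ≥ 1 with n ≤ l*l and C the least c with n ≤ c*(c+1),
-- then A's corrected column count equals C.
theorem col_arith (n L C : Nat)
    (hL1 : n ≤ L * L) (hL2 : ∀ m, 1 ≤ m → m < L → m * m < n)
    (hC1 : n ≤ C * (C + 1)) (hC2 : ∀ m, m < C → m * (m + 1) < n) :
    (if L * (L - 1) ≥ n then L - 1 else L) = C := by
  by_cases hif : L * (L - 1) ≥ n
  · rw [if_pos hif]
    have hge : n ≤ (L - 1) * (L - 1 + 1) := by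
      rcases Nat.eq_zero_or_pos L with h0 | h0
      · subst h0; simpa using hif
      · have hL : L - 1 + 1 = L := by omega
        rw [hL, Nat.mul_comm]; exact hif
    have hmin : ∀ m, m < L - 1 → m * (m + 1) < n := by
      intro m hm
      have := hL2 (m + 1) (by omega) (by omega)
      nlinarith
    have h1 : C ≤ L - 1 := by
      by_contra h
      exact absurd hge (Nat.not_le.mpr (hC2 (L - 1) (by omega)))
    have h2 : L - 1 ≤ C := by
      by_contra h
      exact absurd hC1 (Nat.not_le.mpr (hmin C (by omega)))
    omega
  · rw [if_neg hif]
    have hlt : L * (L - 1) < n := Nat.lt_of_not_le hif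
    have hge : n ≤ L * (L + 1) := by nlinarith
    have hmin : ∀ m, m < L → m * (m + 1) < n := by
      intro m hm
      have hle : m * (m + 1) ≤ (L - 1) * L := Nat.mul_le_mul (by omega) (by omega)
      have hcom : (L - 1) * L = L * (L - 1) := Nat.mul_comm _ _
      linarith
    have h1 : C ≤ L := by
      by_contra h
      exact absurd hge (Nat.not_le.mpr (hC2 L (by omega)))
    have h2 : L ≤ C := by
      by_contra h
      exact absurd hC1 (Nat.not_le.mpr (hmin C (by omega)))
    omega

-- A's corrected column count equals B's directly-computed one.
theorem colunas_eq (n : Nat) :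
    (if pvLinhasLoop n n 1 * (pvLinhasLoop n n 1 - 1) ≥ n then pvLinhasLoop n n 1 - 1
     else pvLinhasLoop n n 1) = pvColunasLoop n n 0 := by
  obtain ⟨hL1, hL2⟩ := linhas_spec n n 1 (by omega)
  obtain ⟨hC1, hC2⟩ := colunas_spec n n 0 (by omega)
  exact col_arith n _ _ hL1 (fun m h1 h2 => hL2 m h1 h2) hC1 (fun m h2 => hC2 m (Nat.zero_le m) h2)

-- ===== VERDICT (by name: the statement is the Claim_ definition above) =====
theorem gera_chave2_spec : Claim_equal_gera_chave2 := by
  intro letras _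
  show pvChave
      (if pvLinhasLoop letras.toList.length letras.toList.length 1 *
            (pvLinhasLoop letras.toList.length letras.toList.length 1 - 1) ≥ letras.toList.length
       then pvLinhasLoop letras.toList.length letras.toList.length 1 - 1
       else pvLinhasLoop letras.toList.length letras.toList.length 1)
      letras.toList.length letras.toList =
    pvChunksLoop (pvColunasLoop letras.toList.length letras.toList.length 0)
      letras.toList.length letras.toList []
  rw [chunks_eq_chave, List.nil_append, colunas_eq]
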